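-- pv_equiv track=rewrite | github.com/dpack78/tossUpGame | RollGetter.py | rolePassed
-- ===== SOURCE A (Python) =====
-- def rolePassed(a_role):
--     hasARed = False
--     for color in a_role:
--         if(color == 'g'):
--             return True
--         if(color == 'r'):
--             hasARed = True
--
--     if(hasARed):
--         return False
--
--     return True
-- ===== SOURCE B (Python) =====
-- def rolePassed(a_role):
--     counts = {}
--     for color in a_role:
--         counts[color] = counts.get(color, 0) + 1
--     return counts.get('g', 0) > 0 or counts.get('r', 0) == 0
-- ===== Notes on version B (the rewrite author's own statement) =====
-- stated objective: alternative
-- what changed: Replaces A's early-return flag loop with a staged approach: build a frequency histogram of all colors once, then decide from the counts of 'g' and 'r'.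
import Mathlib
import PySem

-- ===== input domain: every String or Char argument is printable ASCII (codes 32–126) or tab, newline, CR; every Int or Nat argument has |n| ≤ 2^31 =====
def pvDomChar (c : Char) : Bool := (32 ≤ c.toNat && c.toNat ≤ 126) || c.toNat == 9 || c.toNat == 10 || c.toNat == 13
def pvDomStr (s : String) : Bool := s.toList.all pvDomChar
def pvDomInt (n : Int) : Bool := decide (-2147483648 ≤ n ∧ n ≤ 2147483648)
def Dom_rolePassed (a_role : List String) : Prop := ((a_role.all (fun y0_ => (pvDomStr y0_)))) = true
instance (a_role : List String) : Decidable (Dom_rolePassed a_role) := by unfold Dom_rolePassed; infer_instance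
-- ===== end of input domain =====

-- B replaces A's early-return flag loop with a staged approach: build a
-- frequency histogram of the colors once, then decide from the counts.

-- ===== PORT A =====
-- literal transliteration: loop with early return on 'g', flag on 'r'
def rolePassedLoop (colors : List String) (hasARed : Bool) : Bool :=
  match colors with
  | [] => if hasARed then false else true
  | color :: rest =>
      if color == "g" then true
      else if color == "r" then rolePassedLoop rest true
      else rolePassedLoop rest hasARed

def rolePassed (a_role : List String) : Bool :=
  rolePassedLoop a_role false

-- ===== PORT B =====
-- counts = {}; for color in a_role: counts[color] = counts.get(color, 0) + 1
def rolePassed_alt (a_role : List String) : Bool :=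
  let counts : PySem.Dict String Int :=
    a_role.foldl (fun d color => d.insert color (d.getD color 0 + 1)) PySem.Dict.empty
  counts.getD "g" 0 > 0 || counts.getD "r" 0 == 0

-- ===== PRECONDITION & SPEC =====
def Spec_rolePassed (a_role : List String) (out : Bool) : Prop := out = rolePassed_alt a_role
instance (a_role : List String) (out : Bool) : Decidable (Spec_rolePassed a_role out) := by unfold Spec_rolePassed; infer_instance

-- ===== CLAIM (what is proved, stated in full; the proofs are below) =====
def Claim_equal_rolePassed : Prop := ∀ (a_role : List String), Dom_rolePassed a_role → Spec_rolePassed a_role (rolePassed a_role)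

-- ===== LEMMAS AND PROOFS =====
theorem rolePassedLoop_eq (colors : List String) (hasARed : Bool) :
    rolePassedLoop colors hasARed
      = (decide (0 < colors.count "g") || !(hasARed || decide (colors.count "r" ≠ 0))) := by
  induction colors generalizing hasARed with
  | nil => cases hasARed <;> simp [rolePassedLoop]
  | cons c rest ih =>
      by_cases hg : c = "g"
      · simp [rolePassedLoop, hg]
      · by_cases hr : c = "r"
        · simp [rolePassedLoop, hr, ih]
        · simp [rolePassedLoop, hg, hr, ih]

theorem rolePassed_alt_eq (a_role : List String) :
    rolePassed_alt a_role
      = (decide ("g" ∈ a_role) || decide (a_role.count "r" = 0)) := by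
  unfold rolePassed_alt
  simp [PySem.Dict.foldl_insert_getD_add_one_eq_counter, PySem.Dict.getD_counter]
  by_cases h : a_role.count "r" = 0 <;> simp [h]

-- ===== VERDICT (by name: the statement is the Claim_ definition above) =====
theorem rolePassed_spec : Claim_equal_rolePassed := by
  intro a_role _
  unfold Spec_rolePassed rolePassed
  rw [rolePassedLoop_eq, rolePassed_alt_eq]
  simp [List.count_pos_iff]
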